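-- pv_equiv track=rewrite | github.com/variemai/communicator_profiler | extern_c_wrapper.py | wrap_functions_with_extern_c
-- ===== SOURCE A (Python) =====
-- from itertools import takewhile
--
-- def wrap_functions_with_extern_c(content):
--     lines = content.split('\n')
--     new_content = []
--     i = 0
--
--     while i < len(lines):
--         # If current line is "void" and the next line starts with "F77", then it's a potential target
--         if lines[i].strip() == "void" and i + 1 < len(lines) and lines[i + 1].strip().startswith("F77"):
--             # Check if it's already wrapped with extern "C"
--             if i > 0 and lines[i - 1].strip() == 'extern "C" {':
--                 new_content.append(lines[i])
--             else:
--                 # Add the extern "C" line before the function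
--                 indentation = ''.join(list(takewhile(str.isspace, lines[i])))
--                 new_content.append(indentation + 'extern "C" {')
--                 new_content.append(lines[i])
--
--                 # Increment i and add all the function lines until its closing bracket
--                 i += 1
--                 while i < len(lines) and not lines[i].strip().startswith("}"):
--                     new_content.append(lines[i])
--                     i += 1
--
--                 # Append the closing bracket of the function and '}' to close the extern "C"
--                 if i < len(lines):
--                     new_content.append(lines[i])
--                 new_content.append(indentation + "}")
--         else:
--             new_content.append(lines[i])
--         i += 1
--
--     return '\n'.join(new_content)
-- ===== SOURCE B (Python) =====
-- def wrap_functions_with_extern_c(content):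
--     lines = content.split('\n')
--     out = []
--     inside = False
--     ind = ''
--     prev = None
--     nxts = lines[1:] + [None]
--     for cur, nxt in zip(lines, nxts):
--         if inside:
--             out.append(cur)
--             if cur.strip().startswith('}'):
--                 out.append(ind + '}')
--                 inside = False
--         elif (cur.strip() == 'void' and nxt is not None
--               and nxt.strip().startswith('F77')
--               and not (prev is not None and prev.strip() == 'extern "C" {')):
--             ind = cur[:len(cur) - len(cur.lstrip())]
--             out.append(ind + 'extern "C" {')
--             out.append(cur)
--             inside = True
--         else:
--             out.append(cur)
--         prev = cur
--     if inside:
--         out.append(ind + '}')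
--     return '\n'.join(out)
-- ===== Notes on version B (the rewrite author's own statement) =====
-- stated objective: simpler
-- what changed: Replaces A's index-juggling while loop (with an inner body-consuming while and a lines[i-1] lookback) by a single for-pass over (line, next-line) pairs carrying an `inside` state flag and the previous line, closing the extern block when the closing brace line (or the end of input) is reached.
import Mathlib
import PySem

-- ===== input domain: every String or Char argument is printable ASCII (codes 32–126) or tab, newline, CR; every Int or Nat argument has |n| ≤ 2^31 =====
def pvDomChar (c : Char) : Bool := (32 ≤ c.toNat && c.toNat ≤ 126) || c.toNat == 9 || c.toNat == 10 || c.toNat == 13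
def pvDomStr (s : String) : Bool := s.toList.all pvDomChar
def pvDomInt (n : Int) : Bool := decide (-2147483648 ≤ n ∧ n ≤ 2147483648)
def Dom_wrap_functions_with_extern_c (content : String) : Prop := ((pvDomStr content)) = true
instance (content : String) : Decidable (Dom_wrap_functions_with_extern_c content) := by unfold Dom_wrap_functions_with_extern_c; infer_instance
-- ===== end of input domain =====

-- B replaces A's index-juggling while loop (with an inner body-consuming while and a lines[i-1] lookback)
-- by a single for-pass over (line, next) pairs with an `inside` state flag; objective: simpler, same O(n) cost.

set_option maxRecDepth 4096

-- ===== PORT A =====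
-- inner `while` of A: consume body lines until one whose strip startswith "}"; returns (final i, acc)
def pvA_inner (lines : List String) (i : Nat) (acc : List String) : Nat × List String :=
  if _h : i < lines.length then
    if ¬ (PySem.Str.startswith (PySem.Str.strip lines[i]!) "}") then
      pvA_inner lines (i + 1) (acc ++ [lines[i]!])
    else (i, acc)
  else (i, acc)
termination_by lines.length - i

-- needed for pvA_loop's termination (cited in its decreasing_by)
theorem pvA_inner_ge (lines : List String) (i : Nat) (acc : List String) :
    i ≤ (pvA_inner lines i acc).1 := by
  fun_induction pvA_inner lines i acc with
  | case1 i acc h hc ih => exact Nat.le_of_succ_le ih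
  | case2 => simp
  | case3 => simp

-- outer `while i < len(lines)` of A
def pvA_loop (lines : List String) (i : Nat) (acc : List String) : List String :=
  if _h : i < lines.length then
    if PySem.Str.strip lines[i]! = "void" ∧ i + 1 < lines.length ∧
        PySem.Str.startswith (PySem.Str.strip lines[i + 1]!) "F77" then
      if 0 < i ∧ PySem.Str.strip lines[i - 1]! = "extern \"C\" {" then
        pvA_loop lines (i + 1) (acc ++ [lines[i]!])
      else
        -- indentation = ''.join(list(takewhile(str.isspace, lines[i])))
        let ind := String.ofList ((lines[i]!).toList.takeWhile PySem.Chars.isspace)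
        let r := pvA_inner lines (i + 1) (acc ++ [ind ++ "extern \"C\" {", lines[i]!])
        let acc2 := if r.1 < lines.length then r.2 ++ [lines[r.1]!] else r.2
        pvA_loop lines (r.1 + 1) (acc2 ++ [ind ++ "}"])
    else
      pvA_loop lines (i + 1) (acc ++ [lines[i]!])
  else acc
termination_by lines.length - i
decreasing_by
  · omega
  · have := pvA_inner_ge lines (i + 1)
      (acc ++ [String.ofList (List.takeWhile PySem.Chars.isspace lines[i]!.toList) ++ "extern \"C\" {", lines[i]!])
    omega
  · omega

def wrap_functions_with_extern_c (content : String) : String :=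
  PySem.Str.join "\n" (pvA_loop ((PySem.Str.split? content "\n").getD []) 0 [])

-- ===== PORT B =====
-- zip of the lines with their successors (None after the last), as Source B builds it
def pvZip (lines : List String) : List (String × Option String) :=
  lines.zip ((lines.drop 1).map some ++ [none])

-- detection condition of Source B (current line, next line, previous original line)
def pvB_detect (cur : String) (nxt prev : Option String) : Bool :=
  PySem.Str.strip cur == "void"
  && (match nxt with | some n => PySem.Str.startswith (PySem.Str.strip n) "F77" | none => false)
  && !(match prev with | some p => PySem.Str.strip p == "extern \"C\" {" | none => false)

-- one iteration of Source B's for loop; state = (out, inside, ind, prev)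
def pvB_step (st : List String × Bool × String × Option String) (p : String × Option String) :
    List String × Bool × String × Option String :=
  match st, p with
  | (out, inside, ind, prev), (cur, nxt) =>
    if inside then
      if PySem.Str.startswith (PySem.Str.strip cur) "}" then
        (out ++ [cur, ind ++ "}"], false, ind, some cur)
      else
        (out ++ [cur], true, ind, some cur)
    else if pvB_detect cur nxt prev then
      -- ind = cur[:len(cur) - len(cur.lstrip())]
      let ind' := PySem.Str.slice cur none
        (some (PySem.Str.len cur - PySem.Str.len (PySem.Str.lstrip cur)))
      (out ++ [ind' ++ "extern \"C\" {", cur], true, ind', some cur)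
    else
      (out ++ [cur], false, ind, some cur)

-- trailing `if inside: out.append(ind + '}')` of Source B
def pvB_fin (st : List String × Bool × String × Option String) : List String :=
  if st.2.1 then st.1 ++ [st.2.2.1 ++ "}"] else st.1

def wrap_functions_with_extern_c_alt (content : String) : String :=
  let lines := (PySem.Str.split? content "\n").getD []
  PySem.Str.join "\n" (pvB_fin ((pvZip lines).foldl pvB_step ([], false, "", none)))

-- ===== PRECONDITION & SPEC =====
def Spec_wrap_functions_with_extern_c (content : String) (out : String) : Prop := out = wrap_functions_with_extern_c_alt content
instance (content : String) (out : String) : Decidable (Spec_wrap_functions_with_extern_c content out) := by unfold Spec_wrap_functions_with_extern_c; infer_instance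

-- ===== CLAIM (what is proved, stated in full; the proofs are below) =====
def Claim_equal_wrap_functions_with_extern_c : Prop := ∀ (content : String), Dom_wrap_functions_with_extern_c content → Spec_wrap_functions_with_extern_c content (wrap_functions_with_extern_c content)

-- ===== LEMMAS AND PROOFS =====

-- B's prev variable always holds the previous original line (none at the start)
def pvPrevOK (lines : List String) (i : Nat) (prev : Option String) : Prop :=
  (i = 0 ∧ prev = none) ∨ (0 < i ∧ prev = some lines[i - 1]!)

theorem pvZip_cons (c : String) (rest : List String) :
    pvZip (c :: rest) = (c, rest.head?) :: pvZip rest := by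
  cases rest <;> simp [pvZip]

theorem pvDrop_cons (l : List String) (i : Nat) (h : i < l.length) :
    l.drop i = l[i]! :: l.drop (i + 1) := by
  rw [getElem!_pos l i h]; exact List.drop_eq_getElem_cons h

theorem pvInd_eq (cur : String) :
    PySem.Str.slice cur none (some (PySem.Str.len cur - PySem.Str.len (PySem.Str.lstrip cur)))
      = String.ofList (cur.toList.takeWhile PySem.Chars.isspace) := by
  apply String.toList_inj.mp
  rw [PySem.Str.toList_slice, PySem.Chars.slice_eq_listSlice, String.toList_ofList,
    PySem.Str.len_eq, PySem.Str.len_eq, PySem.Str.toList_lstrip]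
  have hlen : (PySem.Chars.lstrip cur.toList).length ≤ cur.toList.length := by
    simpa [PySem.Chars.lstrip] using List.length_dropWhile_le PySem.Chars.isspace cur.toList
  have h0 : (0:Int) ≤ (cur.toList.length : Int) - ((PySem.Chars.lstrip cur.toList).length : Int) := by
    omega
  rw [PySem.List.slice_to cur.toList h0]
  have ht : ((cur.toList.length : Int) - ((PySem.Chars.lstrip cur.toList).length : Int)).toNat
      = (cur.toList.takeWhile PySem.Chars.isspace).length := by
    have h2 := congrArg List.length
      (List.takeWhile_append_dropWhile (p := PySem.Chars.isspace) (l := cur.toList))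
    simp only [List.length_append] at h2
    simp only [PySem.Chars.lstrip]
    omega
  rw [ht]
  exact (List.prefix_iff_eq_take.mp (List.takeWhile_prefix PySem.Chars.isspace)).symm

-- the main simulation: A's index loop equals B's state-flag fold on every suffix

-- branch equations of the two ports
theorem pvA_loop_stop (lines : List String) (i : Nat) (acc : List String)
    (h : ¬ i < lines.length) : pvA_loop lines i acc = acc := by
  rw [pvA_loop, dif_neg h]

theorem pvA_loop_copy1 (lines : List String) (i : Nat) (acc : List String)
    (h : i < lines.length)
    (hc : ¬ (PySem.Str.strip lines[i]! = "void" ∧ i + 1 < lines.length ∧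
      PySem.Str.startswith (PySem.Str.strip lines[i + 1]!) "F77" = true)) :
    pvA_loop lines i acc = pvA_loop lines (i + 1) (acc ++ [lines[i]!]) := by
  rw [pvA_loop, dif_pos h, if_neg hc]

theorem pvA_loop_copy2 (lines : List String) (i : Nat) (acc : List String)
    (h : i < lines.length)
    (hc1 : PySem.Str.strip lines[i]! = "void" ∧ i + 1 < lines.length ∧
      PySem.Str.startswith (PySem.Str.strip lines[i + 1]!) "F77" = true)
    (hc2 : 0 < i ∧ PySem.Str.strip lines[i - 1]! = "extern \"C\" {") :
    pvA_loop lines i acc = pvA_loop lines (i + 1) (acc ++ [lines[i]!]) := by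
  rw [pvA_loop, dif_pos h, if_pos hc1, if_pos hc2]

theorem pvA_loop_wrap (lines : List String) (i : Nat) (acc : List String)
    (h : i < lines.length)
    (hc1 : PySem.Str.strip lines[i]! = "void" ∧ i + 1 < lines.length ∧
      PySem.Str.startswith (PySem.Str.strip lines[i + 1]!) "F77" = true)
    (hc2 : ¬ (0 < i ∧ PySem.Str.strip lines[i - 1]! = "extern \"C\" {")) :
    pvA_loop lines i acc =
      pvA_loop lines
        ((pvA_inner lines (i + 1)
            (acc ++ [String.ofList ((lines[i]!).toList.takeWhile PySem.Chars.isspace) ++ "extern \"C\" {", lines[i]!])).1 + 1)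
        ((if (pvA_inner lines (i + 1)
              (acc ++ [String.ofList ((lines[i]!).toList.takeWhile PySem.Chars.isspace) ++ "extern \"C\" {", lines[i]!])).1 < lines.length
          then (pvA_inner lines (i + 1)
              (acc ++ [String.ofList ((lines[i]!).toList.takeWhile PySem.Chars.isspace) ++ "extern \"C\" {", lines[i]!])).2
            ++ [lines[(pvA_inner lines (i + 1)
              (acc ++ [String.ofList ((lines[i]!).toList.takeWhile PySem.Chars.isspace) ++ "extern \"C\" {", lines[i]!])).1]!]
          else (pvA_inner lines (i + 1)
              (acc ++ [String.ofList ((lines[i]!).toList.takeWhile PySem.Chars.isspace) ++ "extern \"C\" {", lines[i]!])).2)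
          ++ [String.ofList ((lines[i]!).toList.takeWhile PySem.Chars.isspace) ++ "}"]) := by
  rw [pvA_loop, dif_pos h, if_pos hc1, if_neg hc2]

theorem pvA_inner_stop (lines : List String) (i : Nat) (acc : List String)
    (h : ¬ i < lines.length) : pvA_inner lines i acc = (i, acc) := by
  rw [pvA_inner, dif_neg h]

theorem pvA_inner_close (lines : List String) (i : Nat) (acc : List String)
    (h : i < lines.length)
    (hcl : PySem.Str.startswith (PySem.Str.strip lines[i]!) "}" = true) :
    pvA_inner lines i acc = (i, acc) := by
  rw [pvA_inner, dif_pos h, if_neg (not_not_intro hcl)]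

theorem pvA_inner_body (lines : List String) (i : Nat) (acc : List String)
    (h : i < lines.length)
    (hcl : ¬ PySem.Str.startswith (PySem.Str.strip lines[i]!) "}" = true) :
    pvA_inner lines i acc = pvA_inner lines (i + 1) (acc ++ [lines[i]!]) := by
  rw [pvA_inner, dif_pos h, if_pos hcl]

-- step equations of Source B's loop body
theorem pvB_step_copy (out : List String) (ind : String) (prev : Option String)
    (cur : String) (nxt : Option String) (hdet : pvB_detect cur nxt prev = false) :
    pvB_step (out, false, ind, prev) (cur, nxt) = (out ++ [cur], false, ind, some cur) := by
  simp only [pvB_step, hdet, Bool.false_eq_true, if_false]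

theorem pvB_step_detect (out : List String) (ind : String) (prev : Option String)
    (cur : String) (nxt : Option String) (hdet : pvB_detect cur nxt prev = true) :
    pvB_step (out, false, ind, prev) (cur, nxt) =
      (out ++ [String.ofList (cur.toList.takeWhile PySem.Chars.isspace) ++ "extern \"C\" {", cur],
        true, String.ofList (cur.toList.takeWhile PySem.Chars.isspace), some cur) := by
  simp only [pvB_step, hdet, if_true, Bool.false_eq_true, if_false, pvInd_eq]

theorem pvB_step_close (out : List String) (ind : String) (prev : Option String)
    (cur : String) (nxt : Option String)
    (hcl : PySem.Str.startswith (PySem.Str.strip cur) "}" = true) :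
    pvB_step (out, true, ind, prev) (cur, nxt) = (out ++ [cur, ind ++ "}"], false, ind, some cur) := by
  simp only [pvB_step, hcl, if_true]

theorem pvB_step_body (out : List String) (ind : String) (prev : Option String)
    (cur : String) (nxt : Option String)
    (hcl : ¬ PySem.Str.startswith (PySem.Str.strip cur) "}" = true) :
    pvB_step (out, true, ind, prev) (cur, nxt) = (out ++ [cur], true, ind, some cur) := by
  simp only [pvB_step, hcl, if_true, if_false, Bool.false_eq_true]

-- evaluations of Source B's detection condition
theorem pvDet_not_void (cur : String) (nxt prev : Option String)
    (hv : ¬ PySem.Str.strip cur = "void") : pvB_detect cur nxt prev = false := by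
  simp [pvB_detect, hv]

theorem pvDet_no_next (cur : String) (prev : Option String) :
    pvB_detect cur none prev = false := by
  simp [pvB_detect]

theorem pvDet_no_f77 (cur n : String) (prev : Option String)
    (hs : ¬ PySem.Str.startswith (PySem.Str.strip n) "F77" = true) :
    pvB_detect cur (some n) prev = false := by
  simp at hs
  simp [pvB_detect, hs]

theorem pvDet_wrapped (cur n p : String)
    (hp : PySem.Str.strip p = "extern \"C\" {") :
    pvB_detect cur (some n) (some p) = false := by
  simp [pvB_detect, hp]

theorem pvDet_true_none (cur n : String) (hv : PySem.Str.strip cur = "void")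
    (hs : PySem.Str.startswith (PySem.Str.strip n) "F77" = true) :
    pvB_detect cur (some n) none = true := by
  simp at hs
  simp [pvB_detect, hv, hs]

theorem pvDet_true_some (cur n p : String) (hv : PySem.Str.strip cur = "void")
    (hs : PySem.Str.startswith (PySem.Str.strip n) "F77" = true)
    (hp : ¬ PySem.Str.strip p = "extern \"C\" {") :
    pvB_detect cur (some n) (some p) = true := by
  simp at hs
  simp [pvB_detect, hv, hs, hp]

theorem pvSome (lines : List String) (j : Nat) (h : j < lines.length) :
    lines[j]? = some lines[j]! := by
  rw [getElem!_pos lines j h]; exact List.getElem?_eq_getElem h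

-- the main simulation: A's index loop equals B's state-flag fold on every suffix
theorem pvMain (lines : List String) : ∀ n i, lines.length - i = n → i ≤ lines.length →
    (∀ acc ind0 prev, pvPrevOK lines i prev →
      pvA_loop lines i acc = pvB_fin ((pvZip (lines.drop i)).foldl pvB_step (acc, false, ind0, prev)))
    ∧ (∀ acc ind prev0,
      pvB_fin ((pvZip (lines.drop i)).foldl pvB_step (acc, true, ind, prev0)) =
        (if (pvA_inner lines i acc).1 < lines.length
         then pvA_loop lines ((pvA_inner lines i acc).1 + 1)
                ((pvA_inner lines i acc).2 ++ [lines[(pvA_inner lines i acc).1]!, ind ++ "}"])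
         else (pvA_inner lines i acc).2 ++ [ind ++ "}"])) := by
  intro n
  induction n using Nat.strong_induction_on with
  | _ n ih =>
  intro i hn hi
  by_cases h : i < lines.length
  case neg =>
    have hieq : i = lines.length := by omega
    subst hieq
    refine ⟨fun acc ind0 prev _ => ?_, fun acc ind prev0 => ?_⟩
    · rw [pvA_loop_stop lines _ _ h]
      simp [pvZip, pvB_fin]
    · rw [pvA_inner_stop lines _ _ h]
      simp [pvZip, pvB_fin]
  case pos =>
    have hdrop := pvDrop_cons lines i h
    have hnxt : (lines.drop (i+1)).head? = lines[i+1]? := List.head?_drop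
    constructor
    · intro acc ind0 prev hprev
      rw [hdrop, pvZip_cons, List.foldl_cons, hnxt]
      by_cases c1 : PySem.Str.strip lines[i]! = "void" ∧ i + 1 < lines.length ∧
          PySem.Str.startswith (PySem.Str.strip lines[i + 1]!) "F77" = true
      · have hsome : lines[i+1]? = some lines[i+1]! := pvSome lines (i+1) c1.2.1
        by_cases c2 : 0 < i ∧ PySem.Str.strip lines[i - 1]! = "extern \"C\" {"
        · -- already wrapped: both sides just copy the line
          have hdet : pvB_detect lines[i]! lines[i+1]? prev = false := by
            rcases hprev with ⟨h0, hp⟩ | ⟨_, hp⟩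
            · exact absurd c2.1 (by omega)
            · rw [hsome, hp]; exact pvDet_wrapped _ _ _ c2.2
          rw [pvA_loop_copy2 lines i acc h c1 c2, pvB_step_copy _ _ _ _ _ hdet]
          exact (ih _ (by omega) (i+1) rfl (by omega)).1 (acc ++ [lines[i]!]) ind0
            (some lines[i]!) (Or.inr ⟨by omega, by simp⟩)
        · -- the wrap case
          have hdet : pvB_detect lines[i]! lines[i+1]? prev = true := by
            rcases hprev with ⟨_, hp⟩ | ⟨h0, hp⟩
            · rw [hsome, hp]; exact pvDet_true_none _ _ c1.1 c1.2.2
            · rw [hsome, hp]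
              exact pvDet_true_some _ _ _ c1.1 c1.2.2 (fun hc => c2 ⟨h0, hc⟩)
          rw [pvA_loop_wrap lines i acc h c1 c2, pvB_step_detect _ _ _ _ _ hdet]
          rw [(ih _ (by omega) (i+1) rfl (by omega)).2
            (acc ++ [String.ofList ((lines[i]!).toList.takeWhile PySem.Chars.isspace) ++ "extern \"C\" {", lines[i]!])
            (String.ofList ((lines[i]!).toList.takeWhile PySem.Chars.isspace)) (some lines[i]!)]
          by_cases hrl : (pvA_inner lines (i + 1)
              (acc ++ [String.ofList ((lines[i]!).toList.takeWhile PySem.Chars.isspace) ++ "extern \"C\" {", lines[i]!])).1 < lines.length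
          · rw [if_pos hrl, if_pos hrl]
            simp only [List.append_assoc, List.cons_append, List.nil_append]
          · rw [if_neg hrl, if_neg hrl, pvA_loop_stop lines _ _ (by omega)]
      · have hdet : pvB_detect lines[i]! lines[i+1]? prev = false := by
          by_cases hv : PySem.Str.strip lines[i]! = "void"
          · by_cases hn1 : i + 1 < lines.length
            · rw [pvSome lines (i+1) hn1]
              exact pvDet_no_f77 _ _ _ (fun hs => c1 ⟨hv, hn1, hs⟩)
            · have hnone : lines[i+1]? = none := by
                rw [List.getElem?_eq_none_iff]; omega
              rw [hnone]; exact pvDet_no_next _ _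
          · exact pvDet_not_void _ _ _ hv
        rw [pvA_loop_copy1 lines i acc h c1, pvB_step_copy _ _ _ _ _ hdet]
        exact (ih _ (by omega) (i+1) rfl (by omega)).1 (acc ++ [lines[i]!]) ind0
          (some lines[i]!) (Or.inr ⟨by omega, by simp⟩)
    · intro acc ind prev0
      rw [hdrop, pvZip_cons, List.foldl_cons, hnxt]
      by_cases hcl : PySem.Str.startswith (PySem.Str.strip lines[i]!) "}" = true
      · -- closing line: B emits it plus ind + "}" and leaves the inside state
        rw [pvA_inner_close lines i acc h hcl, pvB_step_close _ _ _ _ _ hcl]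
        rw [← (ih _ (by omega) (i+1) rfl (by omega)).1
          (acc ++ [lines[i]!, ind ++ "}"]) ind (some lines[i]!) (Or.inr ⟨by omega, by simp⟩)]
        rw [if_pos h]
      · -- body line: both sides copy and stay inside
        rw [pvA_inner_body lines i acc h hcl, pvB_step_body _ _ _ _ _ hcl]
        exact (ih _ (by omega) (i+1) rfl (by omega)).2 (acc ++ [lines[i]!]) ind (some lines[i]!)

-- ===== VERDICT (by name: the statement is the Claim_ definition above) =====
theorem wrap_functions_with_extern_c_spec : Claim_equal_wrap_functions_with_extern_c := by
  intro content _dom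
  unfold Spec_wrap_functions_with_extern_c wrap_functions_with_extern_c wrap_functions_with_extern_c_alt
  have h := (pvMain ((PySem.Str.split? content "\n").getD []) ((PySem.Str.split? content "\n").getD []).length 0
    (by omega) (by omega)).1 [] "" none (Or.inl ⟨rfl, rfl⟩)
  simp only [List.drop_zero] at h
  rw [h]
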